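-- pv_equiv track=rewrite | github.com/ZiglaCity/Quine-McCluskey | documentation.py | build_chart
-- ===== SOURCE A (Python) =====
-- def to_binary(num, num_vars):
--     """
--     Converts a number to its binary representation with leading zeros to match the number of variables.
--
--     Args:
--         num (int): The number to convert.
--         num_vars (int): The number of binary digits (variables).
--
--     Returns:
--         str: Binary representation of the number with leading zeros.
--     """
--     return f"{num:0{num_vars}b}"
--
-- def build_chart(minterms, prime_implicants):
--     """
--     Constructs a prime implicant chart mapping prime implicants to the minterms they cover.
--
--     Args:
--         minterms (list of int): The list of minterms to cover.
--         prime_implicants (list of str): List of prime implicants.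
--
--     Returns:
--         dict: A dictionary where keys are prime implicants and values are lists of covered minterms.
--     """
--     chart = {pi: [] for pi in prime_implicants}
--     for minterm in minterms:
--         binary = to_binary(minterm, len(next(iter(prime_implicants))))
--         for pi in prime_implicants:
--             if all(pi_bit == '-' or pi_bit == minterm_bit for pi_bit, minterm_bit in zip(pi, binary)):
--                 chart[pi].append(minterm)
--     return chart
-- ===== SOURCE B (Python) =====
-- def to_binary(num, num_vars):
--     return f"{num:0{num_vars}b}"
--
-- def build_chart(minterms, prime_implicants):
--     if not prime_implicants:
--         return {}
--     width = len(prime_implicants[0])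
--     pairs = [(m, to_binary(m, width)) for m in minterms]
--     distinct = list(dict.fromkeys(b for _, b in pairs))
--     chart = {}
--     for pi in prime_implicants:
--         covered = {b for b in distinct
--                    if all(p == '-' or p == c for p, c in zip(pi, b))}
--         chart[pi] = [m for m, b in pairs if b in covered]
--     return chart
-- ===== Notes on version B (the rewrite author's own statement) =====
-- stated objective: alternative
-- what changed: A runs a minterm-outer/PI-inner double loop doing the wildcard character match once per (minterm, PI) pair and mutating a pre-initialised dict; B precomputes (minterm, binary) pairs and the distinct binaries once, builds for each PI a coverage index (the SET of distinct binaries it matches), and then fills chart[pi] by a pure membership filter over the pairs — the character match never touches an individual minterm. …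
-- outside the precondition, e.g. on build_chart([0], ['-', '-']): A returns {'-': [0, 0]}, B returns {'-': [0]}
-- crash fix: On a non-empty minterm list with an empty prime_implicants list A raises StopIteration (next(iter([]))) while B returns the empty dict. — e.g. on build_chart([1], []): A raises StopIteration, B returns []
import Mathlib
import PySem

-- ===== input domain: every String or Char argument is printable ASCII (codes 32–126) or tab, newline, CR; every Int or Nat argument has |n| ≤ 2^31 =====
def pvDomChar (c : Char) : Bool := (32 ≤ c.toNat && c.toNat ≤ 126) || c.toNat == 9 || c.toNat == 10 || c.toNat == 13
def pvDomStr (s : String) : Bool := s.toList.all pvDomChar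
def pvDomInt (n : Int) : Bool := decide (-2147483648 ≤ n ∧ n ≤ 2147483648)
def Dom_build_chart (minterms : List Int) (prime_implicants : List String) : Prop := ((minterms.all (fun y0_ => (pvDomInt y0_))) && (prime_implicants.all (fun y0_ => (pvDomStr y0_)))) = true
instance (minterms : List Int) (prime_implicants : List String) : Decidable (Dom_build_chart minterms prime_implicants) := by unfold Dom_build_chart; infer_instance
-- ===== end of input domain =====

-- B replaces A's per-(minterm, PI) character matching with a per-PI coverage index: the set of
-- DISTINCT binaries a PI matches, computed once, then a pure membership filter over the minterm
-- pairs fills the chart — alternative decomposition, same cost.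

-- ===== PORT A =====
-- f"{num:0{num_vars}b}": sign-aware zero padding = format(num,'b') left-padded with '0' (sign stays in front)
def to_binary (num : Int) (num_vars : Int) : String :=
  PySem.Str.zfill (PySem.Int.toBin num) num_vars

def build_chart (minterms : List Int) (prime_implicants : List String) : List (String × List Int) :=
  -- chart = {pi: [] for pi in prime_implicants}
  let chart : PySem.Dict String (List Int) :=
    prime_implicants.foldl (fun d pi => d.insert pi []) PySem.Dict.empty
  let chart := minterms.foldl (fun chart minterm =>
    -- next(iter(prime_implicants)) raises StopIteration on []; Pre_ excludes that case (headD "" is never the hit value inside Pre_)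
    let binary := to_binary minterm (PySem.Str.len (prime_implicants.headD ""))
    prime_implicants.foldl (fun chart pi =>
      if (pi.toList.zip binary.toList).all (fun pb => pb.1 == '-' || pb.1 == pb.2) then
        -- chart[pi].append(minterm); pi is always a key of chart here, so no KeyError
        chart.modify pi [] (fun l => l ++ [minterm])
      else chart) chart) chart
  chart.items

-- ===== PORT B =====
def build_chart_alt (minterms : List Int) (prime_implicants : List String) : List (String × List Int) :=
  match prime_implicants with
  | [] => []                         -- if not prime_implicants: return {}
  | pi0 :: _ =>
    let width := PySem.Str.len pi0
    let pairs := minterms.map (fun m => (m, to_binary m width))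
    -- distinct = list(dict.fromkeys(b for _, b in pairs))
    let distinct := PySem.List.dedup (pairs.map (·.2))
    (prime_implicants.foldl (fun d pi =>
        -- covered = {b for b in distinct if all(p == '-' or p == c for p, c in zip(pi, b))}
        let covered : PySem.Set String := PySem.Set.ofList (distinct.filter (fun b =>
          (pi.toList.zip b.toList).all (fun pc => pc.1 == '-' || pc.1 == pc.2)))
        -- chart[pi] = [m for m, b in pairs if b in covered]
        d.insert pi ((pairs.filter (fun mb => PySem.Set.contains covered mb.2)).map (·.1)))
      PySem.Dict.empty).items

-- ===== PRECONDITION & SPEC =====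
-- Pre_ excludes (a) lists with duplicate prime implicants, on which A's per-occurrence append into the
-- deduplicated dict key is accidental (each covered minterm appears once per duplicate occurrence), and
-- (b) a non-empty minterm list with an empty prime_implicants list, on which A raises StopIteration.
def Pre_build_chart (minterms : List Int) (prime_implicants : List String) : Prop :=
  prime_implicants.Nodup ∧ (minterms = [] ∨ prime_implicants ≠ [])
instance (minterms : List Int) (prime_implicants : List String) : Decidable (Pre_build_chart minterms prime_implicants) := by unfold Pre_build_chart; infer_instance
def pvWitness_build_chart : List Int × List String := ([2, 5, -3], ["10-", "1--", "---"])

-- On a non-empty minterm list with an empty prime_implicants list A raises StopIteration; B returns the empty dict.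
def Raises_build_chart (minterms : List Int) (prime_implicants : List String) : Prop :=
  minterms ≠ [] ∧ prime_implicants = []
instance (minterms : List Int) (prime_implicants : List String) : Decidable (Raises_build_chart minterms prime_implicants) := by unfold Raises_build_chart; infer_instance
def pvRaiseWitness_build_chart : List Int × List String := ([1], [])
def pvRaiseWitnessOut_build_chart : List (String × List Int) := []

def Spec_build_chart (minterms : List Int) (prime_implicants : List String) (out : List (String × List Int)) : Prop := out = build_chart_alt minterms prime_implicants
instance (minterms : List Int) (prime_implicants : List String) (out : List (String × List Int)) : Decidable (Spec_build_chart minterms prime_implicants out) := by unfold Spec_build_chart; infer_instance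

-- ===== CLAIM (what is proved, stated in full; the proofs are below) =====
def Claim_equal_build_chart : Prop := ∀ (minterms : List Int) (prime_implicants : List String), Dom_build_chart minterms prime_implicants → Pre_build_chart minterms prime_implicants → Spec_build_chart minterms prime_implicants (build_chart minterms prime_implicants)
def Claim_raises_build_chart : Prop := (∀ (minterms : List Int) (prime_implicants : List String), Dom_build_chart minterms prime_implicants → Raises_build_chart minterms prime_implicants → ¬ Pre_build_chart minterms prime_implicants) ∧ (Dom_build_chart (pvRaiseWitness_build_chart.1) (pvRaiseWitness_build_chart.2) ∧ Raises_build_chart (pvRaiseWitness_build_chart.1) (pvRaiseWitness_build_chart.2) ∧ build_chart_alt (pvRaiseWitness_build_chart.1) (pvRaiseWitness_build_chart.2) = pvRaiseWitnessOut_build_chart)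

-- ===== LEMMAS AND PROOFS =====

-- An association list with distinct keys is its key list paired with its lookups.
theorem items_eq_keys_map_getD {ν : Type} (l : List (String × ν)) (d0 : ν)
    (h : (l.map Prod.fst).Nodup) :
    l = (l.map Prod.fst).map (fun k => (k, (PySem.Dict.mk l).getD k d0)) := by
  induction l with
  | nil => rfl
  | cons p rest ih =>
    obtain ⟨k, v⟩ := p
    simp only [List.map_cons, List.nodup_cons] at h
    simp only [List.map_cons]
    refine List.cons_eq_cons.mpr ⟨?_, ?_⟩
    · simp [PySem.Dict.getD_eq_get?_getD, PySem.Dict.get?_mk_cons]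
    · have hstep : ∀ k' ∈ rest.map Prod.fst,
          (PySem.Dict.mk ((k, v) :: rest)).getD k' d0 = (PySem.Dict.mk rest).getD k' d0 := by
        intro k' hk'
        have hne : k ≠ k' := fun he => h.1 (he ▸ hk')
        simp [PySem.Dict.getD_eq_get?_getD, PySem.Dict.get?_mk_cons,
          (by simpa using hne : (k == k') = false)]
      calc rest = (rest.map Prod.fst).map (fun k1 => (k1, (PySem.Dict.mk rest).getD k1 d0)) := ih h.2
        _ = (rest.map Prod.fst).map (fun k1 => (k1, (PySem.Dict.mk ((k, v) :: rest)).getD k1 d0)) := by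
            apply List.map_congr_left
            intro a ha
            rw [hstep a ha]

-- The inner PI loop: one conditional append per distinct key that is present.
theorem innerA (p1 : String → Bool) (m : Int) (l : List String)
    (d : PySem.Dict String (List Int)) (hnd : l.Nodup) (hc : ∀ k ∈ l, d.contains k = true) :
    (l.foldl (fun ch pi => if p1 pi then ch.modify pi [] (fun v => v ++ [m]) else ch) d).keys = d.keys
    ∧ ∀ k, (l.foldl (fun ch pi => if p1 pi then ch.modify pi [] (fun v => v ++ [m]) else ch) d).getD k []
        = if k ∈ l ∧ p1 k = true then d.getD k [] ++ [m] else d.getD k [] := by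
  induction l generalizing d with
  | nil => simp
  | cons pi rest ih =>
    simp only [List.nodup_cons] at hnd
    have hcpi : d.contains pi = true := hc pi (by simp)
    have hkeys' : (if p1 pi then d.modify pi [] (fun v => v ++ [m]) else d).keys = d.keys := by
      split
      · rw [PySem.Dict.keys_modify, PySem.Dict.keys_insert_of_contains _ _ hcpi]
      · rfl
    have hc' : ∀ k ∈ rest, (if p1 pi then d.modify pi [] (fun v => v ++ [m]) else d).contains k = true := by
      intro k hk
      split
      · rw [PySem.Dict.contains_modify]
        simp [hc k (by simp [hk])]
      · exact hc k (by simp [hk])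
    obtain ⟨ihk, ihg⟩ := ih _ hnd.2 hc'
    constructor
    · simpa [hkeys'] using ihk
    · intro k
      rw [List.foldl_cons, ihg k]
      by_cases hkpi : k = pi
      · subst hkpi
        by_cases hp : p1 k = true
        · simp [hp, hnd.1]
        · simp [hp]
      · have : k ∈ pi :: rest ∧ p1 k = true ↔ k ∈ rest ∧ p1 k = true := by
          simp [hkpi]
        rw [if_congr this rfl rfl]
        congr 1 <;> (split <;> simp [PySem.Dict.getD_modify, hkpi])

-- The outer minterm loop accumulates, per present key, the matching minterms in order.
theorem outerA (p : String → Int → Bool) (pis : List String) (hnd : pis.Nodup)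
    (ms : List Int) (d : PySem.Dict String (List Int)) (hc : ∀ k ∈ pis, d.contains k = true) :
    (ms.foldl (fun ch m => pis.foldl
        (fun ch pi => if p pi m then ch.modify pi [] (fun v => v ++ [m]) else ch) ch) d).keys = d.keys
    ∧ ∀ k ∈ pis, (ms.foldl (fun ch m => pis.foldl
        (fun ch pi => if p pi m then ch.modify pi [] (fun v => v ++ [m]) else ch) ch) d).getD k []
        = d.getD k [] ++ ms.filter (fun m => p k m) := by
  induction ms generalizing d with
  | nil => simp
  | cons m rest ih =>
    obtain ⟨ik, ig⟩ := innerA (fun pi => p pi m) m pis d hnd hc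
    have hc' : ∀ k ∈ pis, (pis.foldl (fun ch pi => if p pi m then ch.modify pi [] (fun v => v ++ [m]) else ch) d).contains k = true := by
      intro k hk
      have := hc k hk
      rw [PySem.Dict.contains_iff_mem_keys] at this ⊢
      rw [ik]; exact this
    obtain ⟨ihk, ihg⟩ := ih _ hc'
    refine ⟨by rw [List.foldl_cons, ihk, ik], ?_⟩
    intro k hk
    rw [List.foldl_cons, ihg k hk, ig k]
    by_cases hp : p k m = true
    · simp [hp, hk]
    · simp [hp]

-- A fold of inserts over distinct fresh keys lists its (key, value) pairs in order.
theorem items_insert_fold (pis : List String) (hnd : pis.Nodup) (v : String → List Int) :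
    (pis.foldl (fun d pi => d.insert pi (v pi)) PySem.Dict.empty).items
      = pis.map (fun pi => (pi, v pi)) := by
  simpa using PySem.Dict.items_foldl_insert_fresh pis (fun a => a) v PySem.Dict.empty
    (fun a _ => PySem.Dict.contains_empty a) (by simpa using hnd)

-- [m for m, b in pairs if q(m, b)] with pairs = [(m, f m) for m in ms]
theorem map_pair_filter_fst {α β : Type} (ms : List α) (f : α → β) (q : α → β → Bool) :
    (((ms.map (fun m => (m, f m))).filter (fun mb => q mb.1 mb.2)).map (·.1))
      = ms.filter (fun m => q m (f m)) := by
  induction ms with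
  | nil => rfl
  | cons m rest ih =>
    simp only [List.map_cons, List.filter_cons]
    split <;> simp_all

theorem build_chart_eq_map (minterms : List Int) (prime_implicants : List String)
    (hnd : prime_implicants.Nodup) :
    build_chart minterms prime_implicants
      = prime_implicants.map (fun pi => (pi, minterms.filter (fun m =>
          (pi.toList.zip (to_binary m (PySem.Str.len (prime_implicants.headD ""))).toList).all
            (fun pb => pb.1 == '-' || pb.1 == pb.2)))) := by
  unfold build_chart
  have hitems : (prime_implicants.foldl (fun d pi => d.insert pi []) PySem.Dict.empty).items
      = prime_implicants.map (fun pi => (pi, ([] : List Int))) :=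
    items_insert_fold prime_implicants hnd _
  set d0 := prime_implicants.foldl (fun d pi => d.insert pi []) PySem.Dict.empty with hd0
  have hd0' : d0 = PySem.Dict.mk (prime_implicants.map (fun pi => (pi, ([] : List Int)))) :=
    PySem.Dict.ext hitems
  have hc : ∀ k ∈ prime_implicants, d0.contains k = true := by
    intro k hk
    rw [PySem.Dict.contains_iff_mem_keys, PySem.Dict.keys, hitems]
    simpa using hk
  obtain ⟨hkeys, hgetD⟩ := outerA
    (fun pi m => (pi.toList.zip (to_binary m (PySem.Str.len (prime_implicants.headD ""))).toList).all
      (fun pb => pb.1 == '-' || pb.1 == pb.2))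
    prime_implicants hnd minterms d0 hc
  set D := minterms.foldl (fun chart minterm =>
      prime_implicants.foldl (fun chart pi =>
        if (pi.toList.zip (to_binary minterm (PySem.Str.len (prime_implicants.headD ""))).toList).all
            (fun pb => pb.1 == '-' || pb.1 == pb.2) then
          chart.modify pi [] (fun l => l ++ [minterm])
        else chart) chart) d0 with hD
  have hcomp : List.map ((fun x => x.1) ∘ fun pi => (pi, ([] : List Int))) prime_implicants
      = prime_implicants := by
    rw [show ((fun x => (x : String × List Int).1) ∘ fun pi : String => (pi, ([] : List Int))) = id from rfl,
      List.map_id]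
  have hDkeys : D.keys = prime_implicants := by
    rw [hkeys, PySem.Dict.keys, hitems, List.map_map, hcomp]
  have hDnodup : (D.items.map Prod.fst).Nodup := by
    have h' := hDkeys
    rw [PySem.Dict.keys] at h'
    rw [show (D.items.map Prod.fst) = D.items.map (fun x => x.1) from rfl, h']
    exact hnd
  have := items_eq_keys_map_getD D.items [] hDnodup
  calc D.items = (D.items.map Prod.fst).map (fun k => (k, (PySem.Dict.mk D.items).getD k [])) := this
    _ = prime_implicants.map (fun k => (k, D.getD k [])) := by
        rw [show (D.items.map Prod.fst) = D.keys from rfl, hDkeys]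
    _ = _ := by
        apply List.map_congr_left
        intro k hk
        rw [hgetD k hk]
        have hmem : (k, ([] : List Int))
            ∈ (PySem.Dict.mk (prime_implicants.map (fun pi => (pi, ([] : List Int))))).items := by
          simpa using hk
        have hnd' : (PySem.Dict.mk (prime_implicants.map (fun pi => (pi, ([] : List Int))))).keys.Nodup := by
          rw [PySem.Dict.keys_mk, List.map_map, hcomp]
          exact hnd
        rw [hd0', PySem.Dict.getD_of_mem_items _ hmem hnd' []]
        simp

-- b in {x for x in l if q(x)}  =  q(b), when b is drawn from l.
theorem set_contains_filter (l : List String) (q : String → Bool) (b : String) (hb : b ∈ l) :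
    PySem.Set.contains (PySem.Set.ofList (l.filter q)) b = q b := by
  simp only [PySem.Set.contains]
  rcases hq : q b with _|_
  · simp [PySem.Set.mem_ofList, List.mem_filter, hq]
  · simp [PySem.Set.mem_ofList, List.mem_filter, hq, hb]

theorem build_chart_alt_eq_map (minterms : List Int) (pi0 : String) (rest : List String)
    (hnd : (pi0 :: rest).Nodup) :
    build_chart_alt minterms (pi0 :: rest)
      = (pi0 :: rest).map (fun pi => (pi, minterms.filter (fun m =>
          (pi.toList.zip (to_binary m (PySem.Str.len pi0)).toList).all
            (fun pb => pb.1 == '-' || pb.1 == pb.2)))) := by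
  simp only [build_chart_alt]
  rw [items_insert_fold _ hnd]
  apply List.map_congr_left
  intro pi _
  refine congrArg (fun l => (pi, l)) ?_
  have hq : ∀ mb ∈ minterms.map (fun m => (m, to_binary m (PySem.Str.len pi0))),
      (PySem.Set.contains
        (PySem.Set.ofList ((PySem.List.dedup ((minterms.map (fun m => (m, to_binary m (PySem.Str.len pi0)))).map (·.2))).filter
          (fun b => (pi.toList.zip b.toList).all (fun pc => pc.1 == '-' || pc.1 == pc.2))))
        mb.2)
      = (pi.toList.zip mb.2.toList).all (fun pc => pc.1 == '-' || pc.1 == pc.2) := by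
    intro mb hmb
    have hdist : mb.2 ∈ PySem.List.dedup ((minterms.map (fun m => (m, to_binary m (PySem.Str.len pi0)))).map (·.2)) :=
      (PySem.List.mem_dedup _ _).2 (List.mem_map_of_mem hmb)
    exact set_contains_filter _ _ _ hdist
  rw [List.filter_congr hq]
  exact map_pair_filter_fst minterms (fun m => to_binary m (PySem.Str.len pi0))
    (fun _ b => (pi.toList.zip b.toList).all (fun pc => pc.1 == '-' || pc.1 == pc.2))

-- ===== VERDICT (by name: the statement is the Claim_ definition above) =====
theorem build_chart_spec : Claim_equal_build_chart := by
  intro minterms prime_implicants _ hpre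
  obtain ⟨hnd, hne⟩ := hpre
  unfold Spec_build_chart
  cases prime_implicants with
  | nil =>
    rcases hne with h | h
    · subst h; rfl
    · exact absurd rfl h
  | cons pi0 rest =>
    rw [build_chart_eq_map _ _ hnd, build_chart_alt_eq_map _ _ _ hnd]
    rfl

theorem build_chart_raises : Claim_raises_build_chart := by
  unfold Claim_raises_build_chart
  refine ⟨?_, by decide⟩
  intro minterms prime_implicants _ hr hpre
  rcases hpre.2 with h | h
  · exact hr.1 h
  · exact h hr.2

-- self-check: the raise-region witness really lies in Raises_ and outside Pre_ (via build_chart_raises)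
theorem build_chart_raises_witness_ok :
    Raises_build_chart pvRaiseWitness_build_chart.1 pvRaiseWitness_build_chart.2 ∧
    ¬ Pre_build_chart pvRaiseWitness_build_chart.1 pvRaiseWitness_build_chart.2 :=
  ⟨build_chart_raises.2.2.1,
   build_chart_raises.1 _ _ build_chart_raises.2.1 build_chart_raises.2.2.1⟩
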